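-- pv_equiv track=rewrite | github.com/shakurturgunov005-dev/efootball-turnir-bot | utils/bracket.py | create_bracket
-- ===== SOURCE A (Python) =====
-- import math
--
-- def create_bracket(players):
--     """
--     Turnir jadvalini yaratish
--
--     Args:
--         players: Ishtirokchilar ro'yxati (to'lov qilganlar)
--
--     Returns:
--         str: Formatlangan turnir jadvali
--     """
--     n = len(players)
--
--     if n < 2:
--         return "🏆 TURNIR JADVALI 🏆\n\nTurnir uchun yetarli ishtirokchi yo'q (kamida 2 ta bo'lishi kerak)."
--
--     # Eng yaqin 2 ning darajasiga yaxlitlash (4, 8, 16, 32...)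
--     size = 2 ** math.ceil(math.log2(n))
--
--     # Jadval sarlavhasi
--     bracket = "🏆 TURNIR JADVALI 🏆\n"
--     bracket += "═" * 40 + "\n\n"
--
--     # Bosqichlarni aniqlash
--     rounds = int(math.log2(size))
--     current_round = rounds
--
--     for round_num in range(rounds, 0, -1):
--         round_name = get_round_name(round_num, rounds)
--         bracket += f"\n⚔️ {round_name} ⚔️\n"
--         bracket += "─" * 40 + "\n"
--
--         matches_in_round = size // (2 ** (rounds - round_num + 1))
--
--         for match_idx in range(matches_in_round):
--             player1_idx = match_idx * 2
--             player2_idx = player1_idx + 1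
--
--             p1 = players[player1_idx]['full_name'] if player1_idx < n else "🔵 BYE (tugallanmagan)"
--             p2 = players[player2_idx]['full_name'] if player2_idx < n else "🔵 BYE (tugallanmagan)"
--
--             bracket += f"⚽️ {p1[:20]:<20} vs {p2[:20]:<20}\n"
--
--     # Jadval oxiri
--     bracket += "\n" + "═" * 40 + "\n"
--     bracket += f"👥 Jami ishtirokchilar: {n} | 🏆 G'olib: aniqlanmagan"
--
--     return bracket
--
-- def get_round_name(round_num, total_rounds):
--     """Bosqich nomini qaytarish"""
--     if round_num == total_rounds:
--         return "🏁 FINAL"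
--     elif round_num == total_rounds - 1:
--         return "🥉 YARIM FINAL"
--     elif round_num == total_rounds - 2:
--         return "🏅 CHORAK FINAL"
--     else:
--         return f"⚔️ 1/{2**(total_rounds - round_num + 1)} FINAL"
-- ===== SOURCE B (Python) =====
-- def create_bracket(players):
--     n = len(players)
--     if n < 2:
--         return "🏆 TURNIR JADVALI 🏆\n\nTurnir uchun yetarli ishtirokchi yo'q (kamida 2 ta bo'lishi kerak)."
--     rounds = (n - 1).bit_length()  # ceil(log2(n)) for n >= 2
--     BYE = "🔵 BYE (tugallanmagan)"
--
--     def lines(ps, m):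
--         # m match lines, consuming the players two at a time via an iterator (BYE once exhausted)
--         out = []
--         it = iter(ps)
--         for _ in range(m):
--             d1 = next(it, None)
--             d2 = next(it, None)
--             p1 = d1['full_name'] if d1 is not None else BYE
--             p2 = d2['full_name'] if d2 is not None else BYE
--             out.append(f"\u26bd\ufe0f {p1[:20]:<20} vs {p2[:20]:<20}\n")
--         return "".join(out)
--
--     def name(r):
--         off = rounds - r
--         if off == 0:
--             return "🏁 FINAL"
--         if off == 1:
--             return "🥉 YARIM FINAL"
--         if off == 2:
--             return "🏅 CHORAK FINAL"
--         return f"⚔️ 1/{2 ** (off + 1)} FINAL"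
--
--     def sections(r):
--         # sections for rounds r, r-1, ..., 1, built by recursion on r
--         if r == 0:
--             return ""
--         return ("\n⚔️ " + name(r) + " ⚔️\n" + "─" * 40 + "\n"
--                 + lines(players, 2 ** (r - 1)) + sections(r - 1))
--
--     return ("🏆 TURNIR JADVALI 🏆\n" + "═" * 40 + "\n\n" + sections(rounds)
--             + "\n" + "═" * 40 + "\n"
--             + f"👥 Jami ishtirokchilar: {n} | 🏆 G'olib: aniqlanmagan")
-- ===== Notes on version B (the rewrite author's own statement) =====
-- stated objective: alternative
-- what changed: B replaces A's index-based nested range loops with a recursion over rounds that concatenates per-round sections, each section produced by a pairwise pass that consumes the player list two at a time (no size table, no player indexing).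
import Mathlib
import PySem

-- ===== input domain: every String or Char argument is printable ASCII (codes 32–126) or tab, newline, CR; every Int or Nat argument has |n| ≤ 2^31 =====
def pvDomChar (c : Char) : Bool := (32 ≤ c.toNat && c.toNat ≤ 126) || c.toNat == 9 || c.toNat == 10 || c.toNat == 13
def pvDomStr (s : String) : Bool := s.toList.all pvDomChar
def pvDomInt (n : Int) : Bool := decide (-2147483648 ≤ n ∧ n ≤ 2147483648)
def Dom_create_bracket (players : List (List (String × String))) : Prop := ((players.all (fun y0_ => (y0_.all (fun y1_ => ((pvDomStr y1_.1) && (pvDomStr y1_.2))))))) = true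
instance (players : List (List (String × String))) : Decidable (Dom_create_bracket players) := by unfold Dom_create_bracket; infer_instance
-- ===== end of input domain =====

-- B rebuilds the bracket by a recursion over rounds whose sections consume the player list pairwise; return-value equivalence only (no mutation involved).

-- ===== PORT A =====
-- A-side helpers. The match-line f-string "⚽️ {p1[:20]:<20} vs {p2[:20]:<20}\n":
-- [:20] = take 20, :<20 = pad right with spaces. players[i]['full_name'] is first-match
-- lookup on the association list; a missing key raises KeyError in Python (excluded by
-- Pre_), here getD "" stands in outside the claimed domain.
def pvPad20 (t : List Char) : List Char := t ++ List.replicate (20 - t.length) ' '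

def pvMatchLine (players : List (List (String × String))) (n : Nat) (i : Nat) : List Char :=
  let p1 := if 2 * i < n then (((players.getD (2 * i) []).lookup "full_name").getD "") else "🔵 BYE (tugallanmagan)"
  let p2 := if 2 * i + 1 < n then (((players.getD (2 * i + 1) []).lookup "full_name").getD "") else "🔵 BYE (tugallanmagan)"
  "⚽️ ".toList ++ pvPad20 (p1.toList.take 20) ++ " vs ".toList ++ pvPad20 (p2.toList.take 20) ++ "\n".toList

-- get_round_name, A's if-chain (round numbers are the Nats 1..total_rounds, so Nat
-- subtraction is exact in every branch that can fire).
def get_round_name (round_num total_rounds : Nat) : List Char :=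
  if round_num = total_rounds then "🏁 FINAL".toList
  else if round_num = total_rounds - 1 then "🥉 YARIM FINAL".toList
  else if round_num = total_rounds - 2 then "🏅 CHORAK FINAL".toList
  else "⚔️ 1/".toList ++ PySem.Int.toChars (2 ^ (total_rounds - round_num + 1)) ++ " FINAL".toList

-- A: size = 2 ** ceil(log2(n)) (exact here: Nat.clog 2; Python's float log2 is exact for
-- list lengths), then nested loops, the outer over range(rounds, 0, -1) (round_num =
-- rounds - j), the inner over range(matches_in_round) indexing players, string +=.
def create_bracket (players : List (List (String × String))) : String :=
  let n := players.length
  if n < 2 then String.ofList "🏆 TURNIR JADVALI 🏆\n\nTurnir uchun yetarli ishtirokchi yo'q (kamida 2 ta bo'lishi kerak).".toList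
  else
    let rounds := Nat.clog 2 n
    let size := 2 ^ rounds
    let bracket := "🏆 TURNIR JADVALI 🏆\n".toList ++ List.replicate 40 '═' ++ "\n\n".toList
    let bracket := (List.range rounds).foldl (fun acc j =>
      let round_num := rounds - j
      let acc := acc ++ "\n⚔️ ".toList ++ get_round_name round_num rounds ++ " ⚔️\n".toList
                  ++ List.replicate 40 '─' ++ "\n".toList
      let matches_in_round := size / 2 ^ (rounds - round_num + 1)
      (List.range matches_in_round).foldl (fun acc2 i => acc2 ++ pvMatchLine players n i) acc) bracket
    String.ofList (bracket ++ "\n".toList ++ List.replicate 40 '═' ++ "\n".toList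
      ++ "👥 Jami ishtirokchilar: ".toList ++ PySem.Int.toChars n ++ " | 🏆 G'olib: aniqlanmagan".toList)

-- ===== PORT B =====
-- B-side helpers. next(it, None) on an iterator over a list is head?, advancing = drop.
def pvBye : List Char := "🔵 BYE (tugallanmagan)".toList

def pvPadB (t : List Char) : List Char :=
  let u := t.take 20
  u ++ List.replicate (20 - u.length) ' '

def pvNameOf (d? : Option (List (String × String))) : List Char :=
  match d? with
  | some d => ((d.lookup "full_name").getD "").toList
  | none => pvBye

-- B's lines: m match lines, consuming the player list two at a time (BYE once exhausted).
def pvLinesB (ps : List (List (String × String))) : Nat → List Char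
  | 0 => []
  | m + 1 =>
    "⚽️ ".toList ++ pvPadB (pvNameOf ps.head?) ++ " vs ".toList
      ++ pvPadB (pvNameOf (ps.drop 1).head?) ++ "\n".toList ++ pvLinesB (ps.drop 2) m

-- B's name(r): if-chain on the offset rounds - r.
def pvNameB (rounds r : Nat) : List Char :=
  let off := rounds - r
  if off = 0 then "🏁 FINAL".toList
  else if off = 1 then "🥉 YARIM FINAL".toList
  else if off = 2 then "🏅 CHORAK FINAL".toList
  else "⚔️ 1/".toList ++ PySem.Int.toChars (2 ^ (off + 1)) ++ " FINAL".toList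

-- B's sections(r): the sections for rounds r, r-1, ..., 1, by recursion on r;
-- round r has 2^(r-1) matches.
def pvSectionsB (players : List (List (String × String))) (rounds : Nat) : Nat → List Char
  | 0 => []
  | r + 1 =>
    "\n⚔️ ".toList ++ pvNameB rounds (r + 1) ++ " ⚔️\n".toList
      ++ List.replicate 40 '─' ++ "\n".toList
      ++ pvLinesB players (2 ^ r) ++ pvSectionsB players rounds r

def create_bracket_alt (players : List (List (String × String))) : String :=
  let n := players.length
  if n < 2 then String.ofList "🏆 TURNIR JADVALI 🏆\n\nTurnir uchun yetarli ishtirokchi yo'q (kamida 2 ta bo'lishi kerak).".toList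
  else
    let rounds := Nat.clog 2 n   -- (n-1).bit_length() for n ≥ 2
    String.ofList ("🏆 TURNIR JADVALI 🏆\n".toList ++ List.replicate 40 '═' ++ "\n\n".toList
      ++ pvSectionsB players rounds rounds
      ++ "\n".toList ++ List.replicate 40 '═' ++ "\n".toList
      ++ "👥 Jami ishtirokchilar: ".toList ++ PySem.Int.toChars n ++ " | 🏆 G'olib: aniqlanmagan".toList)

-- ===== PRECONDITION & SPEC =====
-- Pre_ excludes exactly the inputs where Python A raises KeyError: with ≥ 2 players,
-- every player dict must contain the key 'full_name' (every player index is read in the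
-- widest round).
def Pre_create_bracket (players : List (List (String × String))) : Prop :=
  players.length < 2 ∨ (players.all (fun d => (d.lookup "full_name").isSome)) = true
instance (players : List (List (String × String))) : Decidable (Pre_create_bracket players) := by unfold Pre_create_bracket; infer_instance
def pvWitness_create_bracket : (List (List (String × String))) := [[("full_name", "Ali")], [("full_name", "Vali")]]

def Spec_create_bracket (players : List (List (String × String))) (out : String) : Prop := out = create_bracket_alt players
instance (players : List (List (String × String))) (out : String) : Decidable (Spec_create_bracket players out) := by unfold Spec_create_bracket; infer_instance

-- ===== CLAIM (what is proved, stated in full; the proofs are below) =====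
def Claim_equal_create_bracket : Prop := ∀ (players : List (List (String × String))), Dom_create_bracket players → Pre_create_bracket players → Spec_create_bracket players (create_bracket players)

-- ===== LEMMAS AND PROOFS =====

-- the two round-name helpers agree on the round numbers that occur (1 ≤ r ≤ rounds)
theorem round_name_agree (r rounds : Nat) (h1 : 1 ≤ r) (h2 : r ≤ rounds) :
    get_round_name r rounds = pvNameB rounds r := by
  simp only [get_round_name, pvNameB]
  by_cases h0 : r = rounds
  · rw [if_pos h0, if_pos (by omega : rounds - r = 0)]
  · rw [if_neg h0]
    by_cases hb : r = rounds - 1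
    · rw [if_pos hb, if_neg (by omega : ¬ rounds - r = 0), if_pos (by omega : rounds - r = 1)]
    · rw [if_neg hb]
      by_cases hc : r = rounds - 2
      · rw [if_pos hc, if_neg (by omega : ¬ rounds - r = 0), if_neg (by omega : ¬ rounds - r = 1),
            if_pos (by omega : rounds - r = 2)]
      · rw [if_neg hc, if_neg (by omega : ¬ rounds - r = 0), if_neg (by omega : ¬ rounds - r = 1),
            if_neg (by omega : ¬ rounds - r = 2)]

-- A's indexed participant i equals B's head of the list dropped to position i
theorem name_at (players : List (List (String × String))) (k : Nat) :
    (if k < players.length then (((players.getD k []).lookup "full_name").getD "") else "🔵 BYE (tugallanmagan)").toList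
      = pvNameOf (players.drop k).head? := by
  rw [List.head?_drop]
  by_cases hk : k < players.length
  · rw [if_pos hk, List.getElem?_eq_getElem hk]
    simp [pvNameOf, List.getD_eq_getElem?_getD, List.getElem?_eq_getElem hk]
  · rw [if_neg hk, List.getElem?_eq_none (by omega : players.length ≤ k)]
    rfl

-- A's one match line at index i is B's line at the twice-dropped list
theorem match_line_eq (players : List (List (String × String))) (i : Nat) :
    pvMatchLine players players.length i
      = "⚽️ ".toList ++ pvPadB (pvNameOf ((players.drop (2 * i)).head?)) ++ " vs ".toList
          ++ pvPadB (pvNameOf (((players.drop (2 * i)).drop 1).head?)) ++ "\n".toList := by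
  have h1 : (players.drop (2 * i)).drop 1 = players.drop (2 * i + 1) := by
    rw [List.drop_drop]
  simp only [pvMatchLine, h1]
  rw [← name_at players (2 * i), ← name_at players (2 * i + 1)]
  simp [pvPadB, pvPad20]

-- A's inner accumulation loop from index s is B's pairwise-consuming recursion on the drop
theorem inner_loop_eq (players : List (List (String × String))) (m : Nat) :
    ∀ (s : Nat) (acc : List Char),
    (List.range' s m).foldl (fun acc2 i => acc2 ++ pvMatchLine players players.length i) acc
      = acc ++ pvLinesB (players.drop (2 * s)) m := by
  induction m with
  | zero => intro s acc; simp [pvLinesB]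
  | succ m ih =>
    intro s acc
    rw [List.range'_succ, List.foldl_cons, ih (s + 1)]
    have hdrop : (players.drop (2 * s)).drop 2 = players.drop (2 * (s + 1)) := by
      rw [List.drop_drop, show 2 * s + 2 = 2 * (s + 1) by omega]
    conv_rhs => rw [show pvLinesB (players.drop (2 * s)) (m + 1)
      = "⚽️ ".toList ++ pvPadB (pvNameOf (players.drop (2 * s)).head?) ++ " vs ".toList
        ++ pvPadB (pvNameOf ((players.drop (2 * s)).drop 1).head?) ++ "\n".toList
        ++ pvLinesB ((players.drop (2 * s)).drop 2) m from rfl]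
    rw [hdrop, match_line_eq players s]
    simp

-- A's outer loop over range(rounds, 0, -1) is B's recursion over sections
theorem outer_loop_eq (players : List (List (String × String))) (rounds r : Nat) :
    r ≤ rounds → ∀ (acc : List Char),
    (List.range' (rounds - r) r).foldl (fun acc j =>
      let round_num := rounds - j
      let acc := acc ++ "\n⚔️ ".toList ++ get_round_name round_num rounds ++ " ⚔️\n".toList
                  ++ List.replicate 40 '─' ++ "\n".toList
      let matches_in_round := 2 ^ rounds / 2 ^ (rounds - round_num + 1)
      (List.range matches_in_round).foldl
        (fun acc2 i => acc2 ++ pvMatchLine players players.length i) acc) acc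
      = acc ++ pvSectionsB players rounds r := by
  induction r with
  | zero => intro _ acc; simp [pvSectionsB]
  | succ r ih =>
    intro hr acc
    rw [List.range'_succ, List.foldl_cons]
    have hj : rounds - (rounds - (r + 1)) = r + 1 := by omega
    have hstep : rounds - (r + 1) + 1 = rounds - r := by omega
    rw [hstep, ih (by omega)]
    simp only [hj]
    have hexp : rounds - (r + 1) + 1 = rounds - r := by omega
    have hm : 2 ^ rounds / 2 ^ (rounds - (r + 1) + 1) = 2 ^ r := by
      rw [hexp, Nat.pow_div (by omega) (by omega), show rounds - (rounds - r) = r by omega]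
    rw [hm]
    rw [show (List.range (2 ^ r)) = List.range' 0 (2 ^ r) from List.range_eq_range']
    rw [inner_loop_eq players (2 ^ r) 0]
    rw [round_name_agree (r + 1) rounds (by omega) hr]
    conv_rhs => rw [show pvSectionsB players rounds (r + 1)
      = "\n⚔️ ".toList ++ pvNameB rounds (r + 1) ++ " ⚔️\n".toList
        ++ List.replicate 40 '─' ++ "\n".toList
        ++ pvLinesB players (2 ^ r) ++ pvSectionsB players rounds r from rfl]
    simp

-- ===== VERDICT (by name: the statement is the Claim_ definition above) =====
theorem create_bracket_spec : Claim_equal_create_bracket := by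
  intro players _ _
  unfold Spec_create_bracket create_bracket create_bracket_alt
  by_cases h2 : players.length < 2
  · simp [h2]
  · simp only [h2, if_false]
    have hr : List.range (Nat.clog 2 players.length)
        = List.range' (Nat.clog 2 players.length - Nat.clog 2 players.length)
            (Nat.clog 2 players.length) := by
      rw [Nat.sub_self]; exact List.range_eq_range'
    rw [hr, outer_loop_eq players (Nat.clog 2 players.length) (Nat.clog 2 players.length)
          le_rfl]
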